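-- pv_equiv track=rewrite | github.com/3vantage/aquascene-content-engine | services/ai-processor/src/optimizers/content_optimizer.py | _add_step_structure
-- ===== SOURCE A (Python) =====
-- def _add_step_structure(content: str) -> str:
--     """Add step structure to how-to content"""
--     # This is a simplified implementation
--     # In practice, this would use NLP to identify sequential actions
--     paragraphs = content.split('\n\n')
--
--     if len(paragraphs) >= 3:
--         structured_content = []
--         for i, paragraph in enumerate(paragraphs, 1):
--             if i == 1:
--                 structured_content.append(paragraph)  # Introduction
--             elif i == len(paragraphs):
--                 structured_content.append(paragraph)  # Conclusion
--             else:
--                 structured_content.append(f"Step {i-1}: {paragraph}")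
--
--         return '\n\n'.join(structured_content)
--
--     return content
-- ===== SOURCE B (Python) =====
-- def _add_step_structure(content: str) -> str:
--     """Add step structure to how-to content"""
--     paragraphs = content.split('\n\n')
--     if len(paragraphs) < 3:
--         return content
--
--     def rec(ps, k):
--         # last paragraph: emitted unlabelled (conclusion)
--         if len(ps) == 1:
--             return ps[0]
--         return f"Step {k}: {ps[0]}" + '\n\n' + rec(ps[1:], k + 1)
--
--     return paragraphs[0] + '\n\n' + rec(paragraphs[1:], 1)
-- ===== Notes on version B (the rewrite author's own statement) =====
-- stated objective: alternative
-- what changed: Replaces A's indexed loop (enumerate with i==1/i==len branches, a list accumulator and a final join) by direct recursion on the paragraph tail that concatenates the output string as it goes, carrying the step counter; no accumulator list and no join.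
import Mathlib
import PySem

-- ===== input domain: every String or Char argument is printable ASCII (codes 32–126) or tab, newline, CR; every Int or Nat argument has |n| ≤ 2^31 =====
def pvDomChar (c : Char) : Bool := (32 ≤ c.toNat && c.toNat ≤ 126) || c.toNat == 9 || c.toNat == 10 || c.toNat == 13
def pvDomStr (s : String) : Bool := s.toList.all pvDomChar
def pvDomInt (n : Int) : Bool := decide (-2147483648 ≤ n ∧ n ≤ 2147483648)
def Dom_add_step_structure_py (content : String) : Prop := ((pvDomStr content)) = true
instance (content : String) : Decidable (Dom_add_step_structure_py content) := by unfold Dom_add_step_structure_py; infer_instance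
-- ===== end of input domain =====

-- B replaces A's indexed loop (list accumulator + final join) by direct recursion on the
-- paragraph tail, concatenating the output string as it goes; objective: alternative.

-- shared f-string helper: f"Step {i}: {p}" on code points
def pvStep (i : Int) (p : List Char) : List Char :=
  "Step ".toList ++ PySem.Int.toChars i ++ ": ".toList ++ p

-- ===== PORT A =====
def add_step_structure_py (content : String) : String :=
  let paragraphs := PySem.Chars.splitOn content.toList ['\n', '\n']
  if 3 ≤ paragraphs.length then
    let structured := (PySem.List.enumerate paragraphs 1).foldl
      (fun acc ip =>
        if ip.1 = 1 then acc ++ [ip.2]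
        else if ip.1 = (paragraphs.length : Int) then acc ++ [ip.2]
        else acc ++ [pvStep (ip.1 - 1) ip.2]) []
    String.ofList (PySem.Chars.join ['\n', '\n'] structured)
  else content

-- ===== PORT B =====
-- rec(ps, k): last paragraph plain, otherwise "Step k: ps[0]" ++ '\n\n' ++ rec(ps[1:], k+1)
def pvRec : List (List Char) → Int → List Char
  | [], _ => []
  | [p], _ => p
  | p :: q :: rest, k => pvStep k p ++ ['\n', '\n'] ++ pvRec (q :: rest) (k + 1)

def add_step_structure_py_alt (content : String) : String :=
  let paragraphs := PySem.Chars.splitOn content.toList ['\n', '\n']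
  if paragraphs.length < 3 then content
  else
    String.ofList (PySem.List.pyGetD paragraphs 0 [] ++ ['\n', '\n']
      ++ pvRec (PySem.List.slice paragraphs (some 1) none) 1)

-- ===== PRECONDITION & SPEC =====
def Spec_add_step_structure_py (content : String) (out : String) : Prop := out = add_step_structure_py_alt content
instance (content : String) (out : String) : Decidable (Spec_add_step_structure_py content out) := by unfold Spec_add_step_structure_py; infer_instance

-- ===== CLAIM (what is proved, stated in full; the proofs are below) =====
def Claim_equal_add_step_structure_py : Prop := ∀ (content : String), Dom_add_step_structure_py content → Spec_add_step_structure_py content (add_step_structure_py content)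

-- ===== LEMMAS AND PROOFS =====

-- every list of length ≥ 2 is h :: mid ++ [t]
lemma pv_decomp {α : Type} (ps : List α) (h : 2 ≤ ps.length) :
    ∃ (x : α) (mid : List α) (t : α), ps = x :: (mid ++ [t]) := by
  match ps, h with
  | x :: rest, h =>
    have hne : rest ≠ [] := by
      intro hr; subst hr; simp at h
    exact ⟨x, rest.dropLast, rest.getLast hne, by simp [List.dropLast_append_getLast hne]⟩

-- A's middle loop appends exactly the "Step (i-1)" labels, re-enumerated from s-1
lemma pv_mid_fold (L : Int) (mid : List (List Char)) :
    ∀ (s : Int) (acc : List (List Char)), 2 ≤ s → s + mid.length ≤ L →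
    (PySem.List.enumerate mid s).foldl
      (fun acc ip =>
        if ip.1 = 1 then acc ++ [ip.2]
        else if ip.1 = L then acc ++ [ip.2]
        else acc ++ [pvStep (ip.1 - 1) ip.2]) acc
    = acc ++ (PySem.List.enumerate mid (s - 1)).map (fun jp => pvStep jp.1 jp.2) := by
  induction mid with
  | nil => intro s acc _ _; simp [PySem.List.enumerate_nil]
  | cons p rest ih =>
    intro s acc h2 hL
    rw [PySem.List.enumerate_cons, PySem.List.enumerate_cons]
    simp only [List.foldl_cons, List.map_cons]
    have hs1 : ¬ (s = 1) := by omega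
    have hsL : ¬ (s = L) := by
      simp [List.length_cons] at hL; omega
    rw [if_neg hs1, if_neg hsL]
    have := ih (s + 1) (acc ++ [pvStep (s - 1) p]) (by omega)
      (by simp [List.length_cons] at hL ⊢; omega)
    rw [this]
    have : s + 1 - 1 = s - 1 + 1 := by omega
    rw [this]
    simp

-- A's whole loop on h :: mid ++ [t] produces [h] ++ labelled mid ++ [t]
lemma pv_loop (h t : List Char) (mid : List (List Char)) :
    (PySem.List.enumerate (h :: (mid ++ [t])) 1).foldl
      (fun acc ip =>
        if ip.1 = 1 then acc ++ [ip.2]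
        else if ip.1 = ((h :: (mid ++ [t])).length : Int) then acc ++ [ip.2]
        else acc ++ [pvStep (ip.1 - 1) ip.2]) []
    = [h] ++ (PySem.List.enumerate mid 1).map (fun jp => pvStep jp.1 jp.2) ++ [t] := by
  rw [PySem.List.enumerate_cons, PySem.List.enumerate_append]
  simp only [List.foldl_cons, List.foldl_append]
  norm_num
  rw [if_neg (by omega : ¬((2:Int) + (mid.length:Int) = 1))]
  rw [if_pos (by omega : (2:Int) + (mid.length:Int) = (mid.length:Int) + 1 + 1)]
  rw [pv_mid_fold ((mid.length:Int) + 1 + 1) mid 2 [h] (by omega) (by omega)]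
  norm_num

-- B's recursion equals join of the labelled middle plus the plain tail
lemma pv_rec_join (t : List Char) (mid : List (List Char)) : ∀ (k : Int),
    pvRec (mid ++ [t]) k
    = PySem.Chars.join ['\n', '\n']
        ((PySem.List.enumerate mid k).map (fun jp => pvStep jp.1 jp.2) ++ [t]) := by
  induction mid with
  | nil => intro k; simp [pvRec, PySem.List.enumerate_nil, PySem.Chars.join_singleton]
  | cons p rest ih =>
    intro k
    rw [PySem.List.enumerate_cons]
    simp only [List.cons_append, List.map_cons]
    cases rest with
    | nil =>
      simp [pvRec, PySem.List.enumerate_nil, PySem.Chars.join_cons_cons,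
        PySem.Chars.join_singleton]
    | cons q rest' =>
      rw [show (p :: (q :: rest' ++ [t])) = p :: q :: (rest' ++ [t]) by simp]
      rw [pvRec]
      rw [show (q :: (rest' ++ [t])) = (q :: rest') ++ [t] by simp, ih (k + 1)]
      rw [PySem.List.enumerate_cons]
      simp [PySem.Chars.join_cons_cons]

-- ===== VERDICT (by name: the statement is the Claim_ definition above) =====
theorem add_step_structure_py_spec : Claim_equal_add_step_structure_py := by
  intro content _
  unfold Spec_add_step_structure_py add_step_structure_py add_step_structure_py_alt
  by_cases h3 : 3 ≤ (PySem.Chars.splitOn content.toList ['\n', '\n']).length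
  · rw [if_pos h3, if_neg (by omega)]
    obtain ⟨h, mid, t, hps⟩ := pv_decomp _ (by omega : 2 ≤ (PySem.Chars.splitOn content.toList ['\n', '\n']).length)
    rw [hps, pv_loop h t mid]
    rw [PySem.List.slice_from_one]
    simp only [List.tail_cons, PySem.List.pyGetD_zero_cons]
    rw [pv_rec_join t mid 1]
    rw [show ([h] ++ (PySem.List.enumerate mid 1).map (fun jp => pvStep jp.1 jp.2) ++ [t])
        = h :: ((PySem.List.enumerate mid 1).map (fun jp => pvStep jp.1 jp.2) ++ [t]) by simp]
    cases hm : (PySem.List.enumerate mid 1).map (fun jp => pvStep jp.1 jp.2) ++ [t] with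
    | nil => simp at hm
    | cons y ys => rw [PySem.Chars.join_cons_cons]
  · rw [if_neg h3, if_pos (by omega)]
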